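-- pv_equiv track=rewrite | github.com/dreamthreebs/psilc-mirror | psfit/fitpsnoise/discrete_fit4.py | alternate_loop_with_index
-- ===== SOURCE A (Python) =====
-- def alternate_loop_with_index(array):
--     n = len(array)
--     mid = n // 2  # find middle index
--     yield mid, array[mid]
--
--     left, right = mid - 1, mid + 1
--
--     while left >= 0 or right < n:
--         if right < n:
--             yield right, array[right]
--             right += 1
--
--         if left >= 0:
--             yield left, array[left]
--             left -= 1
-- ===== SOURCE B (Python) =====
-- def alternate_loop_with_index(array):
--     n = len(array)
--     mid = n // 2
--     yield mid, array[mid]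
--     rights = [(i, array[i]) for i in range(mid + 1, n)]
--     lefts = [(i, array[i]) for i in range(mid - 1, -1, -1)]
--     for r, l in zip(rights, lefts):
--         yield r
--         yield l
--     k = min(len(rights), len(lefts))
--     yield from rights[k:]
--     yield from lefts[k:]
-- ===== Notes on version B (the rewrite author's own statement) =====
-- stated objective: alternative
-- what changed: Replaces the twin-pointer while-loop over mutable left/right indices with precomputing the right-of-middle and reversed left-of-middle (index,value) lists and then interleaving them right-first, flushing the remainder.
import Mathlib
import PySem

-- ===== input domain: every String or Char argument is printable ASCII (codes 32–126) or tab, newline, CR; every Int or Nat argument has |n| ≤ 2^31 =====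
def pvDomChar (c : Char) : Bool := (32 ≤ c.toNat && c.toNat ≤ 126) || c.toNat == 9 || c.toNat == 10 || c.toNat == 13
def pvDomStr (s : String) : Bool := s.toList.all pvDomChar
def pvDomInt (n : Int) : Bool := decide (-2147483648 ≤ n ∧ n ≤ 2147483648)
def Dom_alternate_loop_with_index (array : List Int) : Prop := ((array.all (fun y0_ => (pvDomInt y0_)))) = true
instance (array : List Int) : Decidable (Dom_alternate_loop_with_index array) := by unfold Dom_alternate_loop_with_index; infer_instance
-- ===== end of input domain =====

-- B replaces A's twin-pointer loop with precomputed right/left (index,value) lists interleaved right-first (objective: alternative decomposition).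


-- ===== PORT A =====
-- A's while-loop with the two pointers; under Pre_ (nonempty array) every index
-- accessed is in range, so the .getD 0 default is never taken.  The Nat `fuel`
-- is only a structural totality guard: it starts at array.length + 1, which
-- exceeds the loop's decreasing measure (left+1) + (n-right), so it never runs out.
def altA_go (array : List Int) (n : Int) : Nat → Int → Int → List (Int × Int)
  | 0, _, _ => []
  | fuel + 1, left, right =>
    if left ≥ 0 ∨ right < n then
      (if right < n then [(right, (PySem.List.pyGet? array right).getD 0)] else []) ++
      (if left ≥ 0 then [(left, (PySem.List.pyGet? array left).getD 0)] else []) ++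
      altA_go array n fuel (if left ≥ 0 then left - 1 else left) (if right < n then right + 1 else right)
    else []

def alternate_loop_with_index (array : List Int) : List (Int × Int) :=
  let n : Int := array.length
  let mid : Int := PySem.Int.floordiv n 2
  (mid, (PySem.List.pyGet? array mid).getD 0) :: altA_go array n (array.length + 1) (mid - 1) (mid + 1)

-- ===== PORT B =====
-- B's while-loop popping one element from each list per round, then the flushes.
def altB_interleave : List (Int × Int) → List (Int × Int) → List (Int × Int)
  | r :: rs, l :: ls => r :: l :: altB_interleave rs ls
  | rs, ls => rs ++ ls

def alternate_loop_with_index_alt (array : List Int) : List (Int × Int) :=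
  let n : Int := array.length
  let mid : Int := PySem.Int.floordiv n 2
  let rights := (PySem.List.pyRange (mid + 1) n 1).map (fun i => (i, (PySem.List.pyGet? array i).getD 0))
  let lefts := (PySem.List.pyRange (mid - 1) (-1) (-1)).map (fun i => (i, (PySem.List.pyGet? array i).getD 0))
  (mid, (PySem.List.pyGet? array mid).getD 0) :: altB_interleave rights lefts

-- ===== PRECONDITION & SPEC =====
-- Pre_ excludes only the empty list, on which Python's A raises IndexError at array[mid].
def Pre_alternate_loop_with_index (array : List Int) : Prop := array ≠ []
instance (array : List Int) : Decidable (Pre_alternate_loop_with_index array) := by unfold Pre_alternate_loop_with_index; infer_instance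
def pvWitness_alternate_loop_with_index : List Int := [1, 2, 3]

def Spec_alternate_loop_with_index (array : List Int) (out : List (Int × Int)) : Prop := out = alternate_loop_with_index_alt array
instance (array : List Int) (out : List (Int × Int)) : Decidable (Spec_alternate_loop_with_index array out) := by unfold Spec_alternate_loop_with_index; infer_instance

-- ===== CLAIM (what is proved, stated in full; the proofs are below) =====
def Claim_equal_alternate_loop_with_index : Prop := ∀ (array : List Int), Dom_alternate_loop_with_index array → Pre_alternate_loop_with_index array → Spec_alternate_loop_with_index array (alternate_loop_with_index array)

-- ===== LEMMAS AND PROOFS =====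

-- A's pointer loop equals B's interleave of the two range-built lists,
-- whenever the fuel exceeds the loop's decreasing measure.
theorem altA_go_eq_interleave (array : List Int) (n : Int) :
    ∀ (fuel : Nat) (left right : Int),
      (left + 1).toNat + (n - right).toNat ≤ fuel →
      altA_go array n fuel left right =
        altB_interleave
          ((PySem.List.pyRange right n 1).map (fun i => (i, (PySem.List.pyGet? array i).getD 0)))
          ((PySem.List.pyRange left (-1) (-1)).map (fun i => (i, (PySem.List.pyGet? array i).getD 0))) := by
  intro fuel
  induction fuel with
  | zero =>
    intro left right hm
    rw [altA_go, PySem.List.pyRange_one_eq_nil (by omega : n ≤ right),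
      PySem.List.pyRange_neg_one_eq_nil (by omega : left ≤ -1)]
    simp [altB_interleave]
  | succ fuel ih =>
    intro left right hm
    by_cases hr : right < n <;> by_cases hl : left ≥ 0
    · -- right < n, left ≥ 0
      rw [altA_go, if_pos (Or.inl hl)]
      rw [PySem.List.pyRange_one_cons hr, PySem.List.pyRange_neg_one_cons (by omega : (-1 : Int) < left)]
      simp only [List.map_cons, altB_interleave, if_pos hr, if_pos hl,
        List.cons_append, List.nil_append, List.singleton_append]
      rw [ih (left - 1) (right + 1) (by omega)]
    · -- right < n, left < 0
      rw [altA_go, if_pos (Or.inr hr)]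
      rw [PySem.List.pyRange_one_cons hr, PySem.List.pyRange_neg_one_eq_nil (by omega : left ≤ -1)]
      simp only [List.map_cons, List.map_nil, if_pos hr, if_neg hl, List.append_nil,
        List.singleton_append]
      rw [ih left (right + 1) (by omega)]
      simp only [PySem.List.pyRange_neg_one_eq_nil (by omega : left ≤ -1), List.map_nil]
      cases (PySem.List.pyRange (right + 1) n 1).map (fun i => (i, (PySem.List.pyGet? array i).getD 0)) <;>
        simp [altB_interleave]
    · -- right ≥ n, left ≥ 0
      rw [altA_go, if_pos (Or.inl hl)]
      rw [PySem.List.pyRange_one_eq_nil (by omega : n ≤ right),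
        PySem.List.pyRange_neg_one_cons (by omega : (-1 : Int) < left)]
      simp only [List.map_nil, List.map_cons, if_neg hr, if_pos hl, List.nil_append,
        List.singleton_append]
      rw [ih (left - 1) right (by omega)]
      simp only [PySem.List.pyRange_one_eq_nil (by omega : n ≤ right), List.map_nil]
      cases (PySem.List.pyRange (left - 1) (-1) (-1)).map (fun i => (i, (PySem.List.pyGet? array i).getD 0)) <;>
        simp [altB_interleave]
    · -- neither: both ranges empty
      rw [altA_go, if_neg (by omega)]
      rw [PySem.List.pyRange_one_eq_nil (by omega : n ≤ right),
        PySem.List.pyRange_neg_one_eq_nil (by omega : left ≤ -1)]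
      simp [altB_interleave]

-- ===== VERDICT (by name: the statement is the Claim_ definition above) =====
theorem alternate_loop_with_index_spec : Claim_equal_alternate_loop_with_index := by
  intro array _ _
  unfold Spec_alternate_loop_with_index alternate_loop_with_index alternate_loop_with_index_alt
  simp only []
  rw [altA_go_eq_interleave array _ _ _ _ (by
    simp [PySem.Int.floordiv]
    have h3 : ((array.length : Int)).fdiv 2 = (array.length : Int) / 2 :=
      Int.fdiv_eq_ediv_of_nonneg _ (by positivity)
    omega)]
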